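-- pv_equiv track=rewrite | github.com/Verified-Intelligence/CROWN-Reach | run.py | parse_verifier_output
-- ===== SOURCE A (Python) =====
-- def parse_verifier_output(output):
--     time_str = ""
--     result_str = "VERIFIED"
--     output_lower = output.lower()
--
--     for line in output_lower.splitlines():
--         if "time cost" in line:
--             time_str = line.split(":")[1].strip().split()[0]
--         if any(keyword in line for keyword in ["unsafe", "unreachable", "falsified"]):
--             result_str = "FALSIFIED"
--         elif any(keyword in line for keyword in ["flow* terminated", "killed", "unknown"]):
--             result_str = "UNKNOWN"
--     return result_str, time_str
-- ===== SOURCE B (Python) =====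
-- def _extract_time(lines):
--     for line in reversed(lines):
--         if "time cost" in line:
--             return line.split(":")[1].strip().split()[0]
--     return ""
--
-- FALSIFIED_KEYWORDS = ("unsafe", "unreachable", "falsified")
-- UNKNOWN_KEYWORDS = ("flow* terminated", "killed", "unknown")
--
-- def _extract_result(lines):
--     for line in reversed(lines):
--         if any(k in line for k in FALSIFIED_KEYWORDS):
--             return "FALSIFIED"
--         if any(k in line for k in UNKNOWN_KEYWORDS):
--             return "UNKNOWN"
--     return "VERIFIED"
--
-- def parse_verifier_output(output):
--     lines = output.lower().splitlines()
--     return _extract_result(lines), _extract_time(lines)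
-- ===== Notes on version B (the rewrite author's own statement) =====
-- stated objective: simpler
-- what changed: A's single forward loop threading (time_str, result_str) state is decomposed into two independent back-to-front scans over the lines, each returning at its first (i.e. last-in-file) matching line with no carried state.
-- outside the precondition, e.g. on parse_verifier_output('time cost oops\nTime cost: 3 s'): A raises IndexError, B returns ('VERIFIED', '3')
import Mathlib
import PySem

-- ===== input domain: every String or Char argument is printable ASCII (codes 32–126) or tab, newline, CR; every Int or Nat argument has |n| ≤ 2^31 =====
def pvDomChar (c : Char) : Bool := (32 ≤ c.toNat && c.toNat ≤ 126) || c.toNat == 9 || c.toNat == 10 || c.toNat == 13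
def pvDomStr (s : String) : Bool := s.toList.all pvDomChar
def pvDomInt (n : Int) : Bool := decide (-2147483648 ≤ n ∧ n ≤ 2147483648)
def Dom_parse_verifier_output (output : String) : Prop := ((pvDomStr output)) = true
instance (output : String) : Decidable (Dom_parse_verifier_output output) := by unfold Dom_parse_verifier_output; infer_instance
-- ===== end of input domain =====

-- B replaces A's single stateful forward loop by two independent back-to-front
-- scans (last matching line wins by first match on the reversed line list): simpler decomposition, same cost.

-- ===== PORT A =====
-- line.split(":")[1].strip().split()[0]; the `.getD ""` marks where Python raises
-- IndexError (no ":" / no token) — those inputs are excluded by Pre_ below.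
def pvTokA (line : String) : String :=
  (PySem.List.pyGet?
    (PySem.Str.split₀ (PySem.Str.strip
      ((PySem.List.pyGet? ((PySem.Str.split? line ":").getD []) 1).getD ""))) 0).getD ""

def parse_verifier_output (output : String) : String × String :=
  let output_lower := PySem.Str.lower output
  let res := (PySem.Str.splitlines output_lower).foldl
    (fun (st : String × String) line =>
      let time_str := if PySem.Str.isIn "time cost" line then pvTokA line else st.1
      let result_str :=
        if ["unsafe", "unreachable", "falsified"].any (fun k => PySem.Str.isIn k line) then
          "FALSIFIED"
        else if ["flow* terminated", "killed", "unknown"].any (fun k => PySem.Str.isIn k line) then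
          "UNKNOWN"
        else st.2
      (time_str, result_str))
    ("", "VERIFIED")
  (res.2, res.1)

-- ===== PORT B =====
-- B extracts the token with the same expression as A; the leaf helper pvTokA is shared
def pvExtractTime : List String → String
  | [] => ""
  | l :: ls => if PySem.Str.isIn "time cost" l then pvTokA l else pvExtractTime ls

def pvExtractResult : List String → String
  | [] => "VERIFIED"
  | l :: ls =>
    if ["unsafe", "unreachable", "falsified"].any (fun k => PySem.Str.isIn k l) then
      "FALSIFIED"
    else if ["flow* terminated", "killed", "unknown"].any (fun k => PySem.Str.isIn k l) then
      "UNKNOWN"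
    else pvExtractResult ls

def parse_verifier_output_alt (output : String) : String × String :=
  let lines := PySem.Str.splitlines (PySem.Str.lower output)
  (pvExtractResult lines.reverse, pvExtractTime lines.reverse)

-- ===== PRECONDITION & SPEC =====
-- Pre_ excludes inputs on which Python A raises IndexError: a line containing
-- "time cost" with no ":" or with no whitespace-separated token after the first ":".
-- a "time cost" line is good iff it has a ":" and a whitespace-separated token after the first ":"
def pvGoodLine (l : String) : Bool :=
  decide (2 ≤ ((PySem.Str.split? l ":").getD []).length) &&
  !(PySem.Str.split₀ (PySem.Str.strip
      ((PySem.List.pyGet? ((PySem.Str.split? l ":").getD []) 1).getD ""))).isEmpty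

def Pre_parse_verifier_output (output : String) : Prop :=
  ∀ l ∈ PySem.Str.splitlines (PySem.Str.lower output),
    PySem.Str.isIn "time cost" l = true → pvGoodLine l = true

instance (output : String) : Decidable (Pre_parse_verifier_output output) := by
  unfold Pre_parse_verifier_output; infer_instance

def pvWitness_parse_verifier_output : String :=
  "unsafe system\nTime cost: 3.5 seconds\nDone"

def Spec_parse_verifier_output (output : String) (out : String × String) : Prop := out = parse_verifier_output_alt output
instance (output : String) (out : String × String) : Decidable (Spec_parse_verifier_output output out) := by unfold Spec_parse_verifier_output; infer_instance

-- ===== CLAIM (what is proved, stated in full; the proofs are below) =====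
def Claim_equal_parse_verifier_output : Prop := ∀ (output : String), Dom_parse_verifier_output output → Pre_parse_verifier_output output → Spec_parse_verifier_output output (parse_verifier_output output)

-- ===== LEMMAS AND PROOFS =====

-- A's fold step, named for the proofs
def pvStepA (st : String × String) (line : String) : String × String :=
  let time_str := if PySem.Str.isIn "time cost" line then pvTokA line else st.1
  let result_str :=
    if ["unsafe", "unreachable", "falsified"].any (fun k => PySem.Str.isIn k line) then
      "FALSIFIED"
    else if ["flow* terminated", "killed", "unknown"].any (fun k => PySem.Str.isIn k line) then
      "UNKNOWN"
    else st.2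
  (time_str, result_str)

-- B's scans with an explicit default, to carry the fold's initial state
def pvTimeD : List String → String → String
  | [], t => t
  | l :: ls, t => if PySem.Str.isIn "time cost" l then pvTokA l else pvTimeD ls t

def pvResD : List String → String → String
  | [], r => r
  | l :: ls, r =>
    if ["unsafe", "unreachable", "falsified"].any (fun k => PySem.Str.isIn k l) then
      "FALSIFIED"
    else if ["flow* terminated", "killed", "unknown"].any (fun k => PySem.Str.isIn k l) then
      "UNKNOWN"
    else pvResD ls r

theorem pvFold_eq (rs : List String) : ∀ t r : String,
    List.foldl pvStepA (t, r) rs.reverse = (pvTimeD rs t, pvResD rs r) := by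
  induction rs with
  | nil => intro t r; simp [pvTimeD, pvResD]
  | cons l ls ih =>
    intro t r
    simp only [List.reverse_cons, List.foldl_append, List.foldl_cons, List.foldl_nil, ih]
    simp only [pvStepA, pvTimeD, pvResD]

theorem pvTimeD_empty (rs : List String) : pvTimeD rs "" = pvExtractTime rs := by
  induction rs with
  | nil => rfl
  | cons l ls ih => simp only [pvTimeD, pvExtractTime, ih]

theorem pvResD_verified (rs : List String) : pvResD rs "VERIFIED" = pvExtractResult rs := by
  induction rs with
  | nil => rfl
  | cons l ls ih => simp only [pvResD, pvExtractResult, ih]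

-- ===== VERDICT (by name: the statement is the Claim_ definition above) =====
theorem parse_verifier_output_spec : Claim_equal_parse_verifier_output := by
  intro output _ _
  show parse_verifier_output output = parse_verifier_output_alt output
  have hA : parse_verifier_output output =
      ((List.foldl pvStepA ("", "VERIFIED") (PySem.Str.splitlines (PySem.Str.lower output))).2,
       (List.foldl pvStepA ("", "VERIFIED") (PySem.Str.splitlines (PySem.Str.lower output))).1) := rfl
  have h := pvFold_eq (PySem.Str.splitlines (PySem.Str.lower output)).reverse "" "VERIFIED"
  rw [List.reverse_reverse] at h
  rw [hA, h, pvTimeD_empty, pvResD_verified]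
  rfl
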